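-- pv_equiv track=rewrite | github.com/Vikseko/PyDJD | Intervals.py | _encode_geq
-- ===== SOURCE A (Python) =====
-- def _encode_geq(x, a):
--     assert len(x) == len(a)
--     if len(x) == 0:
--         return []
--     clauses = []
--     assert isinstance(a[0], bool)
--     if a[0]:
--         clauses.append([x[0]])
--         clauses.extend(_encode_geq(x[1:], a[1:]))
--     else:
--         # Append (x=1) to all sub-clauses:
--         for clause in _encode_geq(x[1:], a[1:]):
--             clauses.append([x[0]] + clause)
--     return clauses
-- ===== SOURCE B (Python) =====
-- def _encode_geq(x, a):
--     assert len(x) == len(a)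
--     clauses = []
--     prefix = []
--     for xi, ai in zip(x, a):
--         assert isinstance(ai, bool)
--         if ai:
--             clauses.append(prefix + [xi])
--         else:
--             prefix.append(xi)
--     return clauses
-- ===== Notes on version B (the rewrite author's own statement) =====
-- stated objective: faster
-- what changed: Replaced the recursion that re-copies every sub-clause at each level with a single left-to-right pass that maintains the prefix of false-bit literals and emits each true bit's clause once.
import Mathlib
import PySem

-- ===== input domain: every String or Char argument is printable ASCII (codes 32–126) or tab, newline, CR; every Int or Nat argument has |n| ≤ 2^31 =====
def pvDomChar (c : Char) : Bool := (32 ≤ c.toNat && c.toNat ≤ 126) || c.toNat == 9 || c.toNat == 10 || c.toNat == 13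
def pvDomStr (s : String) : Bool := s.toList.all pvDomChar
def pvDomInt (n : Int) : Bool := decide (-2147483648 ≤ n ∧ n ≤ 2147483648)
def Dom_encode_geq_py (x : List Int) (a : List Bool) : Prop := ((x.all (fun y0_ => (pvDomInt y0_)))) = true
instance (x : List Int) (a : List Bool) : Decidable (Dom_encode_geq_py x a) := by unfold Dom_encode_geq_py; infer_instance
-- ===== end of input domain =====

-- B replaces A's recursion (which re-copies all sub-clauses at each level) with one pass
-- maintaining the prefix of false-bit literals; objective: faster.


-- ===== PORT A =====
-- literal port of A's recursion; the mismatched-length case (A raises AssertionError)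
-- is excluded by Pre_encode_geq_py, the [] returned there is never claimed about
def encode_geq_py : List Int → List Bool → List (List Int)
  | [], _ => []
  | _ :: _, [] => []
  | x0 :: xs, a0 :: as =>
    if a0 then [x0] :: encode_geq_py xs as
    else (encode_geq_py xs as).map (fun c => [x0] ++ c)

-- ===== PORT B =====
-- one pass over zip x a with state (clauses, prefix)
def encode_geq_py_alt (x : List Int) (a : List Bool) : List (List Int) :=
  ((x.zip a).foldl
    (fun (s : List (List Int) × List Int) p =>
      if p.2 then (s.1 ++ [s.2 ++ [p.1]], s.2) else (s.1, s.2 ++ [p.1]))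
    ([], [])).1

-- ===== PRECONDITION & SPEC =====
-- A asserts len(x) == len(a) and raises AssertionError otherwise; Pre_ excludes exactly that.
def Pre_encode_geq_py (x : List Int) (a : List Bool) : Prop := x.length = a.length
instance (x : List Int) (a : List Bool) : Decidable (Pre_encode_geq_py x a) := by unfold Pre_encode_geq_py; infer_instance
def pvWitness_encode_geq_py : List Int × List Bool := ([3, -2, 5], [true, false, true])
def Spec_encode_geq_py (x : List Int) (a : List Bool) (out : List (List Int)) : Prop := out = encode_geq_py_alt x a
instance (x : List Int) (a : List Bool) (out : List (List Int)) : Decidable (Spec_encode_geq_py x a out) := by unfold Spec_encode_geq_py; infer_instance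

-- ===== CLAIM (what is proved, stated in full; the proofs are below) =====
def Claim_equal_encode_geq_py : Prop := ∀ (x : List Int) (a : List Bool), Dom_encode_geq_py x a → Pre_encode_geq_py x a → Spec_encode_geq_py x a (encode_geq_py x a)

-- ===== LEMMAS AND PROOFS =====
lemma encode_geq_fold_inv (x : List Int) (a : List Bool) (cl : List (List Int)) (pre : List Int) :
    ((x.zip a).foldl
      (fun (s : List (List Int) × List Int) p =>
        if p.2 then (s.1 ++ [s.2 ++ [p.1]], s.2) else (s.1, s.2 ++ [p.1]))
      (cl, pre)).1 = cl ++ (encode_geq_py x a).map (fun c => pre ++ c) := by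
  induction x generalizing a cl pre with
  | nil => simp [encode_geq_py]
  | cons x0 xs ih =>
    cases a with
    | nil => simp [encode_geq_py]
    | cons a0 as =>
      cases a0 with
      | true =>
        simp only [List.zip_cons_cons, List.foldl_cons, if_pos, encode_geq_py]
        rw [ih]
        simp
      | false =>
        simp only [List.zip_cons_cons, List.foldl_cons, encode_geq_py, if_neg]
        rw [ih]
        simp [List.map_map, Function.comp_def]

-- ===== VERDICT (by name: the statement is the Claim_ definition above) =====
theorem encode_geq_py_spec : Claim_equal_encode_geq_py := by
  intro x a _ _
  unfold Spec_encode_geq_py encode_geq_py_alt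
  rw [encode_geq_fold_inv]
  simp
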